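-- pv_equiv track=rewrite | github.com/geswanel/Algorithms | YaAlgoTrainings/Training5.0/BinSearch/F.py | createPrefix
-- ===== SOURCE A (Python) =====
-- def createPrefix(h, lines, vertLines):
--     prefix = []
--     for line in lines:
--         miny = h + 1; maxy = 0
--         for linePoint in vertLines[line]:
--             if linePoint[1] < miny:
--                 miny = linePoint[1]
--             if linePoint[1] > maxy:
--                 maxy = linePoint[1]
--
--         if prefix:
--             pMiny, pMaxy = prefix[-1]
--             prefix.append((min(pMiny, miny), max(pMaxy, maxy)))
--         else:
--             prefix.append((miny, maxy))
--
--     return prefix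
-- ===== SOURCE B (Python) =====
-- def createPrefix(h, lines, vertLines):
--     ys = [p[1] for line in lines for p in vertLines[line]]
--     mins = [h + 1]
--     for y in ys:
--         mins.append(mins[-1] if mins[-1] < y else y)
--     maxs = [0]
--     for y in ys:
--         maxs.append(maxs[-1] if maxs[-1] > y else y)
--     out = []
--     c = 0
--     for line in lines:
--         c += len(vertLines[line])
--         out.append((mins[c], maxs[c]))
--     return out
-- ===== Notes on version B (the rewrite author's own statement) =====
-- stated objective: alternative
-- what changed: Instead of A's per-line min/max scan fused with an in-place prefix combine via prefix[-1], B flattens all requested lines' y-coordinates into one stream, builds full running-min and running-max arrays over that stream once, and reads each answer off by indexing those arrays at the cumulative point count of each line.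
import Mathlib
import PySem

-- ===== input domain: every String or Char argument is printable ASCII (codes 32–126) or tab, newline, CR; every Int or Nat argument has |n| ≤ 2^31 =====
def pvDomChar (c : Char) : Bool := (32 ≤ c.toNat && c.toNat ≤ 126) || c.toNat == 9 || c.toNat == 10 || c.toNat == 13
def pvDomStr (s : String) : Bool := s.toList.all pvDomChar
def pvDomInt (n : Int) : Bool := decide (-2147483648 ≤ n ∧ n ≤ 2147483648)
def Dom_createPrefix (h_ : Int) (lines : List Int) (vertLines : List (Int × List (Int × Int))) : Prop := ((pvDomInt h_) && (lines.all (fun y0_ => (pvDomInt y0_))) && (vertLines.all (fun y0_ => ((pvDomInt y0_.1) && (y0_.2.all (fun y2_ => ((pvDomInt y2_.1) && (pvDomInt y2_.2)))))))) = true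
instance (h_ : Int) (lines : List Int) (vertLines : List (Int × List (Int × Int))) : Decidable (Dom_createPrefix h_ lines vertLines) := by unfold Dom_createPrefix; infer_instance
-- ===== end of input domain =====

-- B replaces A's fused per-line-scan + prefix[-1] combine by global running-min/max arrays over the flattened point stream, indexed at cumulative counts (alternative decomposition; same cost).


-- ===== PORT A =====
def createPrefix (h_ : Int) (lines : List Int) (vertLines : List (Int × List (Int × Int))) : List (Int × Int) :=
  lines.foldl (fun pfx line =>
    let pts := (vertLines.lookup line).getD []       -- vertLines[line]; Pre_ guarantees the key exists
    let mm := pts.foldl (fun (mm : Int × Int) p =>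
        let mm1 := if p.2 < mm.1 then (p.2, mm.2) else mm
        if p.2 > mm1.2 then (mm1.1, p.2) else mm1) (h_ + 1, 0)
    match pfx.getLast? with
    | some pl => pfx ++ [(min pl.1 mm.1, max pl.2 mm.2)]
    | none => pfx ++ [(mm.1, mm.2)]) []

-- ===== PORT B =====
-- the two scan loops of Source B: running value st.1 is mins[-1]/maxs[-1], st.2 the list built by append
def pvScan (f : Int → Int → Bool) (init : Int) (ys : List Int) : List Int :=
  (ys.foldl (fun (st : Int × List Int) y =>
     let v := if f st.1 y then st.1 else y
     (v, st.2 ++ [v])) (init, [init])).2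

def createPrefix_alt (h_ : Int) (lines : List Int) (vertLines : List (Int × List (Int × Int))) : List (Int × Int) :=
  let ys := lines.flatMap (fun line => ((vertLines.lookup line).getD []).map Prod.snd)
  let mins := pvScan (fun a y => a < y) (h_ + 1) ys
  let maxs := pvScan (fun a y => a > y) 0 ys
  (lines.foldl (fun (st : Nat × List (Int × Int)) line =>
      let c := st.1 + ((vertLines.lookup line).getD []).length
      (c, st.2 ++ [(mins.getD c 0, maxs.getD c 0)])) (0, [])).2

-- ===== PRECONDITION & SPEC =====
-- Pre_ excludes exactly the inputs where some requested line is absent from the dict, on which Python A raises KeyError.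
def Pre_createPrefix (h_ : Int) (lines : List Int) (vertLines : List (Int × List (Int × Int))) : Prop :=
  ∀ l ∈ lines, l ∈ vertLines.map Prod.fst
instance (h_ : Int) (lines : List Int) (vertLines : List (Int × List (Int × Int))) : Decidable (Pre_createPrefix h_ lines vertLines) := by unfold Pre_createPrefix; infer_instance
def pvWitness_createPrefix : Int × List Int × (List (Int × List (Int × Int))) := (5, [1, 2, 1], [(1, [(0, 2), (0, 4)]), (2, [])])
def Spec_createPrefix (h_ : Int) (lines : List Int) (vertLines : List (Int × List (Int × Int))) (out : List (Int × Int)) : Prop := out = createPrefix_alt h_ lines vertLines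
instance (h_ : Int) (lines : List Int) (vertLines : List (Int × List (Int × Int))) (out : List (Int × Int)) : Decidable (Spec_createPrefix h_ lines vertLines out) := by unfold Spec_createPrefix; infer_instance

-- ===== CLAIM (what is proved, stated in full; the proofs are below) =====
def Claim_equal_createPrefix : Prop := ∀ (h_ : Int) (lines : List Int) (vertLines : List (Int × List (Int × Int))), Dom_createPrefix h_ lines vertLines → Pre_createPrefix h_ lines vertLines → Spec_createPrefix h_ lines vertLines (createPrefix h_ lines vertLines)

-- ===== LEMMAS AND PROOFS =====

-- y-coordinates of one line's points
def pvYs (vertLines : List (Int × List (Int × Int))) (line : Int) : List Int :=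
  ((vertLines.lookup line).getD []).map Prod.snd

-- reference computation both ports are reduced to
def pvRef (h_ : Int) (vertLines : List (Int × List (Int × Int))) : List Int → Int → Int → List (Int × Int)
  | [], _, _ => []
  | l :: t, mn, mx =>
      (min mn ((pvYs vertLines l).foldl min (h_ + 1)), max mx ((pvYs vertLines l).foldl max 0)) ::
        pvRef h_ vertLines t (min mn ((pvYs vertLines l).foldl min (h_ + 1)))
          (max mx ((pvYs vertLines l).foldl max 0))

-- recursive form of the scan
def pvScanRec (op : Int → Int → Int) : Int → List Int → List Int
  | _, [] => []
  | a, y :: t => op a y :: pvScanRec op (op a y) t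

lemma foldl_min_comm (t : List Int) : ∀ x y : Int, t.foldl min (min x y) = min (t.foldl min x) y := by
  induction t with
  | nil => intro x y; rfl
  | cons z t ih =>
    intro x y
    simp only [List.foldl_cons]
    rw [show min (min x y) z = min (min x z) y by omega, ih]

lemma foldl_max_comm (t : List Int) : ∀ x y : Int, t.foldl max (max x y) = max (t.foldl max x) y := by
  induction t with
  | nil => intro x y; rfl
  | cons z t ih =>
    intro x y
    simp only [List.foldl_cons]
    rw [show max (max x y) z = max (max x z) y by omega, ih]

lemma foldl_min_le (t : List Int) : ∀ a : Int, t.foldl min a ≤ a := by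
  induction t with
  | nil => intro a; simp
  | cons z t ih => intro a; exact le_trans (ih (min a z)) (by omega)

lemma le_foldl_max (t : List Int) : ∀ a : Int, a ≤ t.foldl max a := by
  induction t with
  | nil => intro a; simp
  | cons z t ih => intro a; exact le_trans (by omega) (ih (max a z))

-- fold over an appended prefix absorbs into a min/max combine (both starts at the sentinel)
lemma foldl_min_append (L0 ys : List Int) (s : Int) :
    (L0 ++ ys).foldl min s = min (L0.foldl min s) (ys.foldl min s) := by
  have h1 : L0.foldl min s ≤ s := foldl_min_le _ _
  rw [List.foldl_append, show L0.foldl min s = min s (L0.foldl min s) by omega, foldl_min_comm]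
  omega

lemma foldl_max_append (L0 ys : List Int) (s : Int) :
    (L0 ++ ys).foldl max s = max (L0.foldl max s) (ys.foldl max s) := by
  have h1 : s ≤ L0.foldl max s := le_foldl_max _ _
  rw [List.foldl_append, show L0.foldl max s = max s (L0.foldl max s) by omega, foldl_max_comm]
  omega

-- A's inner scan equals the running min/max folds over the y-coordinates
lemma inner_eq (pts : List (Int × Int)) : ∀ mm : Int × Int,
    pts.foldl (fun (mm : Int × Int) p =>
        let mm1 := if p.2 < mm.1 then (p.2, mm.2) else mm
        if p.2 > mm1.2 then (mm1.1, p.2) else mm1) mm =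
      ((pts.map Prod.snd).foldl min mm.1, (pts.map Prod.snd).foldl max mm.2) := by
  induction pts with
  | nil => intro mm; rfl
  | cons p t ih =>
    intro mm
    simp only [List.foldl_cons, List.map_cons]
    rw [ih]
    congr 1
    · by_cases h1 : p.2 < mm.1 <;> by_cases h2 : p.2 > mm.2 <;>
        simp [h1, h2] <;> congr 1 <;> omega
    · by_cases h1 : p.2 < mm.1 <;> by_cases h2 : p.2 > mm.2 <;>
        simp [h1, h2] <;> congr 1 <;> omega

-- A's loop with the per-line extreme abstracted, generalized over a nonempty accumulator
lemma A_loop (h_ : Int) (vertLines : List (Int × List (Int × Int))) :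
    ∀ (ls : List Int) (acc : List (Int × Int)) (mn mx : Int), acc.getLast? = some (mn, mx) →
    ls.foldl (fun pfx line =>
      match pfx.getLast? with
      | some pl => pfx ++ [(min pl.1 ((pvYs vertLines line).foldl min (h_ + 1)),
                            max pl.2 ((pvYs vertLines line).foldl max 0))]
      | none => pfx ++ [((pvYs vertLines line).foldl min (h_ + 1), (pvYs vertLines line).foldl max 0)]) acc =
      acc ++ pvRef h_ vertLines ls mn mx := by
  intro ls
  induction ls with
  | nil => intro acc mn mx h; simp [pvRef]
  | cons l t ih =>
    intro acc mn mx h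
    simp only [List.foldl_cons, h]
    rw [ih (acc ++ [(min mn ((pvYs vertLines l).foldl min (h_ + 1)),
          max mx ((pvYs vertLines l).foldl max 0))])
        (min mn ((pvYs vertLines l).foldl min (h_ + 1)))
        (max mx ((pvYs vertLines l).foldl max 0)) (by simp), pvRef]
    simp

-- A reduced to the reference
lemma A_eq_ref (h_ : Int) (lines : List Int) (vertLines : List (Int × List (Int × Int))) :
    createPrefix h_ lines vertLines = pvRef h_ vertLines lines (h_ + 1) 0 := by
  unfold createPrefix
  simp only [inner_eq, ← pvYs.eq_def]
  cases lines with
  | nil => rfl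
  | cons l t =>
    have h1 : (pvYs vertLines l).foldl min (h_ + 1) ≤ h_ + 1 := foldl_min_le _ _
    have h2 : (0 : Int) ≤ (pvYs vertLines l).foldl max 0 := le_foldl_max _ _
    simp only [List.foldl_cons, List.getLast?_nil, List.nil_append, pvRef]
    rw [A_loop h_ vertLines t
        [((pvYs vertLines l).foldl min (h_ + 1), (pvYs vertLines l).foldl max 0)]
        ((pvYs vertLines l).foldl min (h_ + 1)) ((pvYs vertLines l).foldl max 0) (by simp),
      show min (h_ + 1) ((pvYs vertLines l).foldl min (h_ + 1)) = (pvYs vertLines l).foldl min (h_ + 1) by omega,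
      show max 0 ((pvYs vertLines l).foldl max 0) = (pvYs vertLines l).foldl max 0 by omega]
    rfl

-- the scan loop's foldl (in combine-operator form) equals the recursive scan
lemma scan_foldl (op : Int → Int → Int) :
    ∀ (ys : List Int) (a : Int) (acc : List Int),
    ys.foldl (fun (st : Int × List Int) y => (op st.1 y, st.2 ++ [op st.1 y])) (a, acc) =
      (ys.foldl op a, acc ++ pvScanRec op a ys) := by
  intro ys
  induction ys with
  | nil => intro a acc; simp [pvScanRec]
  | cons y t ih =>
    intro a acc
    simp only [List.foldl_cons, pvScanRec]
    rw [ih]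
    simp

lemma pvScan_eq (f : Int → Int → Bool) (op : Int → Int → Int)
    (hf : ∀ a y, (if f a y then a else y) = op a y) (init : Int) (ys : List Int) :
    pvScan f init ys = init :: pvScanRec op init ys := by
  unfold pvScan
  rw [show (fun (st : Int × List Int) y =>
        let v := if f st.1 y then st.1 else y
        (v, st.2 ++ [v])) = (fun (st : Int × List Int) y => (op st.1 y, st.2 ++ [op st.1 y])) by
      funext st y; simp [hf],
    scan_foldl op]
  simp

-- indexing the scan array gives the fold over the taken prefix
lemma scan_getD (op : Int → Int → Int) :
    ∀ (ys : List Int) (c : Nat) (init : Int), c ≤ ys.length →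
    (init :: pvScanRec op init ys).getD c 0 = (ys.take c).foldl op init := by
  intro ys
  induction ys with
  | nil =>
    intro c init hc
    have : c = 0 := Nat.le_zero.mp (by simpa using hc)
    subst this; simp
  | cons y t ih =>
    intro c init hc
    cases c with
    | zero => simp
    | succ c =>
      simp only [pvScanRec, List.getD_cons_succ, List.take_succ_cons, List.foldl_cons]
      exact ih c (op init y) (by simpa using hc)

-- B's counting loop equals the reference, over a general already-consumed prefix L0
lemma B_loop (h_ : Int) (vertLines : List (Int × List (Int × Int))) :
    ∀ (ls : List Int) (L0 : List Int) (out0 : List (Int × Int)) (ysfull : List Int),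
    ysfull = L0 ++ ls.flatMap (pvYs vertLines) →
    (ls.foldl (fun (st : Nat × List (Int × Int)) line =>
        let c := st.1 + ((vertLines.lookup line).getD []).length
        (c, st.2 ++ [((pvScan (fun a y => a < y) (h_ + 1) ysfull).getD c 0,
                      (pvScan (fun a y => a > y) 0 ysfull).getD c 0)])) (L0.length, out0)).2 =
      out0 ++ pvRef h_ vertLines ls (L0.foldl min (h_ + 1)) (L0.foldl max 0) := by
  intro ls
  induction ls with
  | nil => intro L0 out0 ysfull h; simp [pvRef]
  | cons l t ih =>
    intro L0 out0 ysfull h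
    have hy : ysfull = (L0 ++ pvYs vertLines l) ++ t.flatMap (pvYs vertLines) := by
      simp [h, List.flatMap_cons]
    have hc : L0.length + ((vertLines.lookup l).getD []).length = (L0 ++ pvYs vertLines l).length := by
      simp [pvYs]
    have hcle : (L0 ++ pvYs vertLines l).length ≤ ysfull.length := by
      rw [hy]; simp
    have htake : ysfull.take (L0 ++ pvYs vertLines l).length = L0 ++ pvYs vertLines l := by
      rw [hy, List.take_left]
    have hmin : (pvScan (fun a y => a < y) (h_ + 1) ysfull).getD (L0 ++ pvYs vertLines l).length 0
        = (L0 ++ pvYs vertLines l).foldl min (h_ + 1) := by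
      rw [pvScan_eq (fun a y => a < y) min (by intro a y; simp [min_def]; omega),
        scan_getD min ysfull _ _ hcle, htake]
    have hmax : (pvScan (fun a y => a > y) 0 ysfull).getD (L0 ++ pvYs vertLines l).length 0
        = (L0 ++ pvYs vertLines l).foldl max 0 := by
      rw [pvScan_eq (fun a y => a > y) max (by intro a y; simp [max_def]; omega),
        scan_getD max ysfull _ _ hcle, htake]
    simp only [List.foldl_cons, hc, hmin, hmax]
    rw [ih (L0 ++ pvYs vertLines l)
        (out0 ++ [((L0 ++ pvYs vertLines l).foldl min (h_ + 1), (L0 ++ pvYs vertLines l).foldl max 0)])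
        ysfull hy, pvRef,
      foldl_min_append, foldl_max_append]
    simp

-- B reduced to the reference
lemma B_eq_ref (h_ : Int) (lines : List Int) (vertLines : List (Int × List (Int × Int))) :
    createPrefix_alt h_ lines vertLines = pvRef h_ vertLines lines (h_ + 1) 0 := by
  unfold createPrefix_alt
  have := B_loop h_ vertLines lines [] [] (lines.flatMap (pvYs vertLines)) (by simp)
  simpa [pvYs] using this

-- ===== VERDICT (by name: the statement is the Claim_ definition above) =====
theorem createPrefix_spec : Claim_equal_createPrefix := by
  intro h_ lines vertLines _ _
  unfold Spec_createPrefix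
  rw [A_eq_ref, B_eq_ref]
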